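-- pv_equiv track=rewrite | github.com/dvmn-s/Yandex_intership_2022 | yandex_task_5.py | getMaxOrder
-- ===== SOURCE A (Python) =====
-- import copy
--
-- def getMaxOrder(A, K):
--     ans = copy.deepcopy(A)
--
--     for i in range(len(A)):
--         for j in range(len(A[0])):
--             start = (i, j)
--             for l in range(len(A)):
--                 for _ in range(len(A[0])):
--                     point = (l, _)
--                     if (((i - l) ** 2) + ((j - _) ** 2)) <= (K ** 2) and start != point:
--                         ans[i][j] += A[l][_]
--
--     return ans
-- ===== SOURCE B (Python) =====
-- def getMaxOrder(A, K):
--     n = len(A)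
--     m = len(A[0])
--     R = K * K
--     # per-row prefix sums over the first m columns
--     pref = []
--     for row in A:
--         p = [0]
--         for v in row[:m]:
--             p.append(p[-1] + v)
--         pref.append(p)
--     out = []
--     for i, row in enumerate(A):
--         # rows within vertical reach, with the half-width of the disk on that row
--         # (half-width capped at m, which never changes the clipped interval)
--         win = []
--         for l in range(n):
--             rem = R - (i - l) ** 2
--             if rem >= 0:
--                 dj = 0
--                 while dj < m and (dj + 1) ** 2 <= rem:
--                     dj += 1
--                 win.append((l, dj))
--         new = list(row)
--         for j in range(m):
--             s = -row[j]
--             for (l, dj) in win: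
--                 a = max(0, j - dj)
--                 b = min(m, j + dj + 1)
--                 s += pref[l][b] - pref[l][a]
--             new[j] = row[j] + s
--         out.append(new)
--     return out
-- ===== Notes on version B (the rewrite author's own statement) =====
-- stated objective: faster
-- what changed: Replaces the per-cell scan of the whole grid by per-row prefix sums plus a per-row precomputed disk half-width, so each disk row-interval is summed in O(1).
-- outside the precondition, e.g. on getMaxOrder([[1, 2], [3]], 0): A returns [[1, 2], [3]], B raises IndexError
import Mathlib
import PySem

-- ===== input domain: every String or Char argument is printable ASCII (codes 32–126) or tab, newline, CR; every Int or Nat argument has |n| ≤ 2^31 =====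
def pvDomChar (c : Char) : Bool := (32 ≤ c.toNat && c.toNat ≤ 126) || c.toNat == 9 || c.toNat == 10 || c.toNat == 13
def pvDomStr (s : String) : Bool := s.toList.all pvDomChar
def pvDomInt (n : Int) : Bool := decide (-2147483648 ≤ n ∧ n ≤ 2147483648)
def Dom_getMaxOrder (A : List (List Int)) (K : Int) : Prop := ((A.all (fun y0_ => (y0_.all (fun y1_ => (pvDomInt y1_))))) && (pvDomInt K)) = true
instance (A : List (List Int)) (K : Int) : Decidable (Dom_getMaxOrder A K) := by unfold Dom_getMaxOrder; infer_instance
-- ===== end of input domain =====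

-- B replaces A's per-cell full-grid scan by per-row prefix sums and a per-row disk
-- half-width table, summing each disk row-interval in O(1); return values agree on Pre_.

-- ===== PORT A =====
-- A[l][_] ; in-range under Pre_ (getD default never read there)
def pvGet2 (A : List (List Int)) (l t : Nat) : Int := (A.getD l []).getD t 0

-- deepcopy + in-place 'ans[i][j] += A[l][_]' ported cell-by-cell: each cell (i,j) with
-- j < m is updated exactly once (during iteration (i,j) of the outer loops) and all
-- reads are from the original A, so the mutation is this per-cell fold; cells j ≥ m of
-- a longer row are the untouched deepcopy.
def getMaxOrder (A : List (List Int)) (K : Int) : List (List Int) :=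
  let n := A.length
  let m := (A.headD []).length          -- len(A[0]); A = [] raises, excluded by Pre_
  A.mapIdx (fun i row =>
    row.mapIdx (fun j v =>
      if j < m then
        (List.range n).foldl (fun acc (l : Nat) =>
          (List.range m).foldl (fun acc (t : Nat) =>
            if ((i : Int) - (l : Int)) ^ 2 + ((j : Int) - (t : Int)) ^ 2 ≤ K ^ 2 ∧
               ¬(i = l ∧ j = t)
            then acc + pvGet2 A l t else acc) acc) v
      else v))

-- ===== PORT B =====
-- while dj < m and (dj+1)**2 <= rem: dj += 1
def pvDjGo (rem : Int) (m dj : Nat) : Nat :=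
  if dj < m ∧ ((dj : Int) + 1) ^ 2 ≤ rem then pvDjGo rem m (dj + 1) else dj
termination_by m - dj
decreasing_by omega

-- p = [0]; for v in row[:m]: p.append(p[-1] + v)
def pvPrefRow (row : List Int) (m : Nat) : List Int :=
  (row.take m).foldl (fun p v => p ++ [p.getLastD 0 + v]) [0]

-- win = []; for l in range(n): rem = R-(i-l)**2; if rem >= 0: win.append((l, dj))
def pvWin (R : Int) (n m i : Nat) : List (Nat × Nat) :=
  (List.range n).foldl (fun w (l : Nat) =>
    if 0 ≤ R - ((i : Int) - (l : Int)) ^ 2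
    then w ++ [(l, pvDjGo (R - ((i : Int) - (l : Int)) ^ 2) m 0)] else w) []

def getMaxOrder_alt (A : List (List Int)) (K : Int) : List (List Int) :=
  let n := A.length
  let m := (A.headD []).length
  let R := K * K
  let pref := A.map (fun row => pvPrefRow row m)
  A.mapIdx (fun i row =>
    let win := pvWin R n m i
    row.mapIdx (fun j v =>
      if j < m then
        -- s = -row[j]; for (l,dj) in win: s += pref[l][b]-pref[l][a]; new[j] = row[j]+s
        -- a = max(0, j-dj) is Nat subtraction; b = min(m, j+dj+1)
        v + win.foldl (fun s ld =>
          s + ((pref.getD ld.1 []).getD (min m (j + ld.2 + 1)) 0 -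
               (pref.getD ld.1 []).getD (j - ld.2) 0)) (-v)
      else v))

-- ===== PRECONDITION & SPEC =====
-- Pre_ excludes exactly the inputs where an indexing raises: the empty grid (len(A[0])
-- raises in both) and grids with a row shorter than len(A[0]); on the latter A itself
-- raises unless the K-disk happens never to reach a missing cell (e.g. K = 0), while
-- B's prefix-sum pass indexes every row up to len(A[0]) and raises there.
def Pre_getMaxOrder (A : List (List Int)) (K : Int) : Prop :=
  A ≠ [] ∧ ∀ row ∈ A, (A.headD []).length ≤ row.length

instance (A : List (List Int)) (K : Int) : Decidable (Pre_getMaxOrder A K) := by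
  unfold Pre_getMaxOrder; infer_instance

def pvWitness_getMaxOrder : List (List Int) × Int := ([[1, 2], [3, 4]], 1)

def Spec_getMaxOrder (A : List (List Int)) (K : Int) (out : List (List Int)) : Prop := out = getMaxOrder_alt A K
instance (A : List (List Int)) (K : Int) (out : List (List Int)) : Decidable (Spec_getMaxOrder A K out) := by unfold Spec_getMaxOrder; infer_instance

-- ===== CLAIM (what is proved, stated in full; the proofs are below) =====
def Claim_equal_getMaxOrder : Prop := ∀ (A : List (List Int)) (K : Int), Dom_getMaxOrder A K → Pre_getMaxOrder A K → Spec_getMaxOrder A K (getMaxOrder A K)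

-- ===== LEMMAS AND PROOFS =====

-- fold of a guarded accumulation is the start plus the sum of the guarded terms
theorem pv_foldl_ite_add {α : Type} (c : α → Prop) [DecidablePred c] (f : α → Int)
    (L : List α) (a : Int) :
    L.foldl (fun acc x => if c x then acc + f x else acc) a
      = a + (L.map (fun x => if c x then f x else 0)).sum := by
  have h : (fun (acc : Int) x => if c x then acc + f x else acc)
      = (fun acc x => acc + if c x then f x else 0) := by
    funext acc x; split_ifs <;> simp
  rw [h, PySem.List.foldl_add]

theorem pv_sum_map_range (f : Nat → Int) :
    ∀ n, ((List.range n).map f).sum = ∑ t ∈ Finset.range n, f t := by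
  intro n
  induction n with
  | zero => simp
  | succ k ih => simp [List.range_succ, ih, Finset.sum_range_succ]

-- sum over a filtered-and-mapped list as a guarded sum
theorem pv_sum_filter_map {α : Type} (c : α → Bool) (f : α → Int) :
    ∀ (L : List α),
      (((L.filter c).map f).sum) = (L.map (fun x => if c x then f x else 0)).sum := by
  intro L
  induction L with
  | nil => simp
  | cons x xs ih => by_cases h : c x <;> simp [h, ih]

-- pvDjGo computes min m (isqrt rem) for 0 ≤ rem
theorem pvDjGo_spec (rem : Int) (m : Nat) :
    ∀ (fuel dj : Nat), m - dj ≤ fuel → dj ≤ m → ((dj : Int)) ^ 2 ≤ rem →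
      pvDjGo rem m dj ≤ m ∧ ((pvDjGo rem m dj : Int)) ^ 2 ≤ rem ∧
        (pvDjGo rem m dj = m ∨ rem < ((pvDjGo rem m dj : Int) + 1) ^ 2) := by
  intro fuel
  induction fuel with
  | zero =>
    intro dj hf hdm hsq
    have hdm' : dj = m := by omega
    subst hdm'
    rw [pvDjGo]
    simp [hsq]
  | succ k ih =>
    intro dj hf hdm hsq
    rw [pvDjGo]
    by_cases h : dj < m ∧ ((dj : Int) + 1) ^ 2 ≤ rem
    · simp only [h]
      have := ih (dj + 1) (by omega) (by omega) (by push_cast; nlinarith [h.2])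
      exact this
    · simp only [h, if_false]
      refine ⟨hdm, hsq, ?_⟩
      by_cases hm : dj = m
      · exact Or.inl hm
      · right
        have : ¬ ((dj : Int) + 1) ^ 2 ≤ rem := by
          intro hc; exact h ⟨by omega, hc⟩
        omega

-- prefix construction: the fold appends running sums
def pvPS (s : Int) : List Int → List Int
  | [] => []
  | x :: xs => (s + x) :: pvPS (s + x) xs

theorem pvPrefRow_fold (xs : List Int) :
    ∀ (p : List Int), p ≠ [] →
      xs.foldl (fun p v => p ++ [p.getLastD 0 + v]) p = p ++ pvPS (p.getLastD 0) xs := by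
  induction xs with
  | nil => intro p _; simp [pvPS]
  | cons x xs ih =>
    intro p hp
    have hlast : (p ++ [p.getLastD 0 + x]).getLastD 0 = p.getLastD 0 + x := by
      simp
    simp only [List.foldl_cons]
    rw [ih (p ++ [p.getLastD 0 + x]) (by simp), hlast]
    simp [pvPS]

theorem pvPS_getD : ∀ (xs : List Int) (s : Int) (k : Nat), k < xs.length →
    (pvPS s xs).getD k 0 = s + (xs.take (k + 1)).sum := by
  intro xs
  induction xs with
  | nil => intro s k h; simp at h
  | cons x xs ih =>
    intro s k h
    cases k with
    | zero => simp [pvPS]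
    | succ k' =>
      simp only [pvPS, List.getD_cons_succ, List.take_succ_cons, List.sum_cons]
      rw [ih (s + x) k' (by simpa using h)]
      ring

-- pref[k] = sum of first k entries of row[:m]
theorem pvPrefRow_getD (row : List Int) (m k : Nat) (hk : k ≤ (row.take m).length) :
    (pvPrefRow row m).getD k 0 = ((row.take m).take k).sum := by
  unfold pvPrefRow
  rw [pvPrefRow_fold (row.take m) [0] (by simp)]
  cases k with
  | zero => simp
  | succ k' =>
    have h0 : ([(0 : Int)].getLastD 0) = 0 := by simp
    simp only [h0, List.cons_append, List.nil_append, List.getD_cons_succ]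
    rw [pvPS_getD (row.take m) 0 k' (by omega)]
    simp

-- win is the filtered, annotated row range
theorem pvWin_eq (R : Int) (n m i : Nat) :
    pvWin R n m i
      = ((List.range n).filter (fun (l : Nat) => decide (0 ≤ R - ((i : Int) - (l : Int)) ^ 2))).map
          (fun (l : Nat) => (l, pvDjGo (R - ((i : Int) - (l : Int)) ^ 2) m 0)) := by
  unfold pvWin
  have h := PySem.List.foldl_append_if
    (fun (l : Nat) => decide (0 ≤ R - ((i : Int) - (l : Int)) ^ 2))
    (fun (l : Nat) => (l, pvDjGo (R - ((i : Int) - (l : Int)) ^ 2) m 0))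
    (List.range n) []
  simpa using h

-- prefix-range sums as guarded sums over the column range
theorem pv_range_take_sum (ys : List Int) :
    ∀ (k : Nat), k ≤ ys.length → ∑ t ∈ Finset.range k, ys.getD t 0 = (ys.take k).sum := by
  intro k
  induction k with
  | zero => intro _; simp
  | succ k' ih =>
    intro h
    have hk : k' < ys.length := by omega
    rw [Finset.sum_range_succ, ih (by omega)]
    have hg : ys.getD k' 0 = ys[k'] := List.getD_eq_getElem ys 0 hk
    rw [hg]
    exact Eq.symm (List.sum_take_succ ys k' hk)

-- the per-row core: guarded disk sum over columns = prefix interval difference minus self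
theorem pv_row_core (A : List (List Int)) (K : Int) (i j l m : Nat)
    (hm : m = (A.headD []).length) (hrow : m ≤ (A.getD l []).length)
    (hj : j < m) :
    (∑ t ∈ Finset.range m,
        if ((i : Int) - (l : Int)) ^ 2 + ((j : Int) - (t : Int)) ^ 2 ≤ K ^ 2 ∧ ¬(i = l ∧ j = t)
        then pvGet2 A l t else 0)
      = (if 0 ≤ K * K - ((i : Int) - (l : Int)) ^ 2 then
           (pvPrefRow (A.getD l []) m).getD
               (min m (j + pvDjGo (K * K - ((i : Int) - (l : Int)) ^ 2) m 0 + 1)) 0 -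
           (pvPrefRow (A.getD l []) m).getD
               (j - pvDjGo (K * K - ((i : Int) - (l : Int)) ^ 2) m 0) 0
         else 0)
        - (if l = i then pvGet2 A i j else 0) := by
  have hKK : K ^ 2 = K * K := by ring
  set row := A.getD l [] with hrowdef
  set rem := K * K - ((i : Int) - (l : Int)) ^ 2 with hremdef
  by_cases hr : 0 ≤ rem
  · -- the disk reaches row l
    obtain ⟨hd1, hd2, hd3⟩ :=
      pvDjGo_spec rem m m 0 (by omega) (by omega) (by simpa using hr)
    set d := pvDjGo rem m 0 with hddef
    set a := j - d with hadef
    set b := min m (j + d + 1) with hbdef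
    have hab : a ≤ b := by omega
    have hbm : b ≤ m := by omega
    -- column condition ↔ interval membership
    have key : ∀ t : Nat, t < m →
        ((((i : Int) - (l : Int)) ^ 2 + ((j : Int) - (t : Int)) ^ 2 ≤ K ^ 2) ↔
          (a ≤ t ∧ t < b)) := by
      intro t ht
      constructor
      · intro hc
        have h2 : ((j : Int) - (t : Int)) ^ 2 ≤ rem := by rw [hremdef, ← hKK]; linarith
        constructor
        · by_contra hta
          have h3 : (d : Int) + 1 ≤ (j : Int) - (t : Int) := by
            omega
          rcases hd3 with hdm | hlt
          · omega
          · have : ((d : Int) + 1) ^ 2 ≤ ((j : Int) - (t : Int)) ^ 2 := by nlinarith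
            omega
        · by_contra htb
          have h4 : (d : Int) + 1 ≤ (t : Int) - (j : Int) := by omega
          rcases hd3 with hdm | hlt
          · omega
          · have : ((d : Int) + 1) ^ 2 ≤ ((t : Int) - (j : Int)) ^ 2 := by nlinarith
            have : ((t : Int) - (j : Int)) ^ 2 = ((j : Int) - (t : Int)) ^ 2 := by ring
            omega
      · rintro ⟨ha, hb2⟩
        have h5 : -((d : Int)) ≤ (j : Int) - (t : Int) := by omega
        have h6 : (j : Int) - (t : Int) ≤ (d : Int) := by omega
        have h7 : ((j : Int) - (t : Int)) ^ 2 ≤ (d : Int) ^ 2 := by nlinarith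
        rw [hKK]; rw [hremdef] at hd2; linarith
    -- pointwise split of the guard
    have point : ∀ t ∈ Finset.range m,
        (if ((i : Int) - (l : Int)) ^ 2 + ((j : Int) - (t : Int)) ^ 2 ≤ K ^ 2 ∧
            ¬(i = l ∧ j = t) then pvGet2 A l t else 0)
          = ((if a ≤ t ∧ t < b then pvGet2 A l t else 0)
              - (if l = i ∧ t = j then pvGet2 A l t else 0)) := by
      intro t ht
      have htm : t < m := Finset.mem_range.mp ht
      by_cases hp : i = l ∧ j = t
      · have e1 : ((i : Int) - (l : Int)) = 0 := by rw [hp.1]; ring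
        have e2 : ((j : Int) - (t : Int)) = 0 := by rw [hp.2]; ring
        have hint : a ≤ t ∧ t < b := by
          have := hp.2; omega
        have hl : l = i ∧ t = j := ⟨hp.1.symm, hp.2.symm⟩
        rw [if_neg (by rintro ⟨-, hno⟩; exact hno hp), if_pos hint, if_pos hl]
        ring
      · have hl' : ¬(l = i ∧ t = j) := by
          rintro ⟨h1, h2⟩; exact hp ⟨h1.symm, h2.symm⟩
        rw [if_neg hl']
        by_cases hc : ((i : Int) - (l : Int)) ^ 2 + ((j : Int) - (t : Int)) ^ 2 ≤ K ^ 2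
        · rw [if_pos ⟨hc, hp⟩, if_pos ((key t htm).mp hc)]
          ring
        · rw [if_neg (by rintro ⟨h, -⟩; exact hc h),
            if_neg (by intro hin; exact hc ((key t htm).mpr hin))]
          ring
    rw [Finset.sum_congr rfl point, Finset.sum_sub_distrib]
    -- the self term
    have hself : (∑ t ∈ Finset.range m, if l = i ∧ t = j then pvGet2 A l t else 0)
        = (if l = i then pvGet2 A i j else 0) := by
      by_cases hli : l = i
      · have hc : ∀ t : Nat, (l = i ∧ t = j) ↔ (t = j) :=
          fun t => ⟨fun h => h.2, fun h => ⟨hli, h⟩⟩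
        rw [Finset.sum_congr rfl (fun t _ => if_congr (hc t) rfl rfl),
          Finset.sum_ite_eq' (Finset.range m) j (fun t => pvGet2 A l t)]
        rw [if_pos hli, hli]
        simp [hj]
      · have hc : ∀ t : Nat, ¬(l = i ∧ t = j) := by rintro t ⟨h1, -⟩; exact hli h1
        simp [hli]
    -- the interval term via prefix sums
    have hys : (row.take m).length = m := by
      rw [List.length_take]; omega
    have hget : ∀ t : Nat, t < m → pvGet2 A l t = (row.take m).getD t 0 := by
      intro t ht
      have htl : t < row.length := by omega
      have htk : t < (row.take m).length := by omega
      rw [pvGet2, ← hrowdef, List.getD_eq_getElem row 0 htl,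
        List.getD_eq_getElem (row.take m) 0 htk, List.getElem_take]
    have hrangesum : ∀ k : Nat, k ≤ m →
        (∑ t ∈ Finset.range k, pvGet2 A l t) = (pvPrefRow row m).getD k 0 := by
      intro k hk
      rw [pvPrefRow_getD row m k (by omega)]
      rw [← pv_range_take_sum (row.take m) k (by omega)]
      exact Finset.sum_congr rfl (fun t ht => hget t (by
        have := Finset.mem_range.mp ht; omega))
    have hinterval : (∑ t ∈ Finset.range m, if a ≤ t ∧ t < b then pvGet2 A l t else 0)
        = (pvPrefRow row m).getD b 0 - (pvPrefRow row m).getD a 0 := by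
      have hsplit : (∑ t ∈ Finset.range m, if a ≤ t ∧ t < b then pvGet2 A l t else 0)
          = ∑ t ∈ Finset.Ico a b, pvGet2 A l t := by
        have hco : ∀ t : Nat, (a ≤ t ∧ t < b) ↔ t ∈ Finset.Ico a b :=
          fun t => (Finset.mem_Ico).symm
        rw [Finset.sum_congr rfl (fun t _ => if_congr (hco t) rfl rfl),
          Finset.sum_ite_mem]
        have hcap : Finset.range m ∩ Finset.Ico a b = Finset.Ico a b := by
          ext t; simp only [Finset.mem_inter, Finset.mem_range, Finset.mem_Ico]
          omega
        rw [hcap]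
      rw [hsplit, Finset.sum_Ico_eq_sub _ hab, hrangesum b hbm, hrangesum a (by omega)]
    rw [hself, hinterval, if_pos hr]
  · -- the disk misses row l entirely
    have hli : l ≠ i := by
      intro h; subst h
      apply hr
      rw [hremdef]
      simp [mul_self_nonneg]
    have hnone : ∀ t ∈ Finset.range m,
        (if ((i : Int) - (l : Int)) ^ 2 + ((j : Int) - (t : Int)) ^ 2 ≤ K ^ 2 ∧
            ¬(i = l ∧ j = t) then pvGet2 A l t else 0) = 0 := by
      intro t _
      rw [if_neg]
      rintro ⟨hc, -⟩
      apply hr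
      have : ((j : Int) - (t : Int)) ^ 2 ≥ 0 := sq_nonneg _
      rw [hremdef, ← hKK]; linarith
    rw [Finset.sum_congr rfl hnone]
    simp [hr, hli]

-- ===== VERDICT (by name: the statement is the Claim_ definition above) =====
theorem getMaxOrder_spec : Claim_equal_getMaxOrder := by
  intro A K _ hpre
  unfold Spec_getMaxOrder
  obtain ⟨hne, hrows⟩ := hpre
  simp only [getMaxOrder, getMaxOrder_alt]
  apply List.ext_getElem (by simp)
  intro i h1 h2
  simp only [List.getElem_mapIdx]
  apply List.ext_getElem (by simp)
  intro j hj1 hj2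
  simp only [List.getElem_mapIdx]
  by_cases hjm : j < (A.headD []).length
  · rw [if_pos hjm, if_pos hjm]
    have hin : i < A.length := by simpa using h1
    have hjrow : j < (A[i]'hin).length := by simpa using hj1
    have hgetrow : A.getD i [] = A[i]'hin := List.getD_eq_getElem A [] hin
    have hv : pvGet2 A i j = (A[i]'hin)[j]'hjrow := by
      rw [pvGet2, hgetrow, List.getD_eq_getElem _ 0 hjrow]
    set m := (A.headD []).length with hmm
    set n := A.length with hn
    set v := (A[i]'hin)[j]'hjrow with hvdef
    -- LHS: quadruple loop to a double Finset sum
    have hinner : ∀ (l : Nat) (acc : Int),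
        (List.range m).foldl (fun acc (t : Nat) =>
            if ((i : Int) - (l : Int)) ^ 2 + ((j : Int) - (t : Int)) ^ 2 ≤ K ^ 2 ∧
               ¬(i = l ∧ j = t)
            then acc + pvGet2 A l t else acc) acc
          = acc + ∑ t ∈ Finset.range m,
              (if ((i : Int) - (l : Int)) ^ 2 + ((j : Int) - (t : Int)) ^ 2 ≤ K ^ 2 ∧
                  ¬(i = l ∧ j = t) then pvGet2 A l t else 0) := by
      intro l acc
      rw [pv_foldl_ite_add _ _ (List.range m) acc, pv_sum_map_range]
    have hfun : (fun (acc : Int) (l : Nat) =>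
        (List.range m).foldl (fun acc (t : Nat) =>
            if ((i : Int) - (l : Int)) ^ 2 + ((j : Int) - (t : Int)) ^ 2 ≤ K ^ 2 ∧
               ¬(i = l ∧ j = t)
            then acc + pvGet2 A l t else acc) acc)
        = (fun (acc : Int) (l : Nat) => acc + ∑ t ∈ Finset.range m,
            (if ((i : Int) - (l : Int)) ^ 2 + ((j : Int) - (t : Int)) ^ 2 ≤ K ^ 2 ∧
                ¬(i = l ∧ j = t) then pvGet2 A l t else 0)) :=
      funext fun acc => funext fun l => hinner l acc
    rw [hfun, PySem.List.foldl_add, pv_sum_map_range]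
    -- RHS: win fold to a guarded Finset sum
    rw [pvWin_eq, PySem.List.foldl_add, List.map_map]
    simp only [Function.comp_def]
    rw [pv_sum_filter_map, pv_sum_map_range]
    have hv' : pvGet2 A i j = v := hv
    have hpl : ∀ l : Nat, l < n →
        (List.map (fun row => pvPrefRow row m) A).getD l [] = pvPrefRow (A.getD l []) m := by
      intro l hl
      have hl' : l < (List.map (fun row => pvPrefRow row m) A).length := by
        simpa using hl
      rw [List.getD_eq_getElem _ [] hl', List.getElem_map, List.getD_eq_getElem A [] hl]
    have hRHS : (∑ l ∈ Finset.range n,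
          if (fun l => decide (0 ≤ K * K - ((i : Int) - (l : Int)) ^ 2)) l then
            ((List.map (fun row => pvPrefRow row m) A).getD
                (l, pvDjGo (K * K - ((i : Int) - (l : Int)) ^ 2) m 0).1 []).getD
              (min m (j + (l, pvDjGo (K * K - ((i : Int) - (l : Int)) ^ 2) m 0).2 + 1)) 0 -
            ((List.map (fun row => pvPrefRow row m) A).getD
                (l, pvDjGo (K * K - ((i : Int) - (l : Int)) ^ 2) m 0).1 []).getD
              (j - (l, pvDjGo (K * K - ((i : Int) - (l : Int)) ^ 2) m 0).2) 0
          else 0)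
        = (∑ l ∈ Finset.range n,
            if 0 ≤ K * K - ((i : Int) - (l : Int)) ^ 2 then
              (pvPrefRow (A.getD l []) m).getD
                  (min m (j + pvDjGo (K * K - ((i : Int) - (l : Int)) ^ 2) m 0 + 1)) 0 -
              (pvPrefRow (A.getD l []) m).getD
                  (j - pvDjGo (K * K - ((i : Int) - (l : Int)) ^ 2) m 0) 0
            else 0) := by
      apply Finset.sum_congr rfl
      intro l hl
      have hl' : l < n := Finset.mem_range.mp hl
      rw [hpl l hl']
      simp only [decide_eq_true_eq]
    have hcore : ∀ l ∈ Finset.range n,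
        (∑ t ∈ Finset.range m,
            if ((i : Int) - (l : Int)) ^ 2 + ((j : Int) - (t : Int)) ^ 2 ≤ K ^ 2 ∧
                ¬(i = l ∧ j = t) then pvGet2 A l t else 0)
          = (if 0 ≤ K * K - ((i : Int) - (l : Int)) ^ 2 then
               (pvPrefRow (A.getD l []) m).getD
                   (min m (j + pvDjGo (K * K - ((i : Int) - (l : Int)) ^ 2) m 0 + 1)) 0 -
               (pvPrefRow (A.getD l []) m).getD
                   (j - pvDjGo (K * K - ((i : Int) - (l : Int)) ^ 2) m 0) 0
             else 0) - (if l = i then pvGet2 A i j else 0) := by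
      intro l hl
      have hl' : l < n := Finset.mem_range.mp hl
      have hmem : A.getD l [] ∈ A := by
        rw [List.getD_eq_getElem A [] hl']
        exact List.getElem_mem hl'
      exact pv_row_core A K i j l m rfl (hrows _ hmem) hjm
    rw [hRHS, Finset.sum_congr rfl hcore, Finset.sum_sub_distrib]
    have hselfsum : (∑ l ∈ Finset.range n, if l = i then pvGet2 A i j else 0)
        = pvGet2 A i j := by
      rw [Finset.sum_ite_eq' (Finset.range n) i (fun _ => pvGet2 A i j),
        if_pos (Finset.mem_range.mpr (by omega))]
    rw [hselfsum, hv']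
    ring
  · rw [if_neg hjm, if_neg hjm]
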